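-- pv_equiv track=rewrite | github.com/shikhu123/PythonCodes | PythonPractice/test3.py | old_macdonald
-- ===== SOURCE A (Python) =====
-- def old_macdonald(name):
--     a = ''
--     for index, letter in enumerate(name):
--         if index == 0:
--             a += letter.upper()
--         elif index == 3:
--             a += letter.upper()
--         else:
--             a += letter.lower()
--
--     return a
-- ===== SOURCE B (Python) =====
-- def old_macdonald(name):
--     chars = [c.lower() for c in name]
--     if len(name) >= 1:
--         chars[0] = name[0].upper()
--     if len(name) >= 4:
--         chars[3] = name[3].upper()
--     return ''.join(chars)
-- ===== Notes on version B (the rewrite author's own statement) =====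
-- stated objective: simpler
-- what changed: Replaces the index-dispatching accumulator loop by lowercasing everything in one comprehension and overwriting positions 0 and 3 with the uppercased originals.
import Mathlib
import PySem

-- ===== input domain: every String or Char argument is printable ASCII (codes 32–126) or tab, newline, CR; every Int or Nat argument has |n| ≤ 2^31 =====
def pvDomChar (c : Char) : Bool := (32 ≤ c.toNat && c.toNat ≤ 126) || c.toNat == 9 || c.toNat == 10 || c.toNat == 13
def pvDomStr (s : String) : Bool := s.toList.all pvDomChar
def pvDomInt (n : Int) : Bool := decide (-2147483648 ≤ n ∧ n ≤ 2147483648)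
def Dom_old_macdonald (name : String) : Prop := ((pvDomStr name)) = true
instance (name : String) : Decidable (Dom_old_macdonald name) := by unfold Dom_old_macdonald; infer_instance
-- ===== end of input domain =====

-- B lowercases all characters in one comprehension and overwrites positions 0 and 3
-- with the uppercased originals, instead of A's index-dispatching accumulator loop.


-- ===== PORT A =====
-- a = ''; for index, letter in enumerate(name): … ; return a
def old_macdonald (name : String) : String :=
  String.ofList ((PySem.List.enumerate name.toList 0).foldl
    (fun a p =>
      if p.1 = 0 then a ++ [PySem.Chars.upperChar p.2]
      else if p.1 = 3 then a ++ [PySem.Chars.upperChar p.2]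
      else a ++ [PySem.Chars.lowerChar p.2]) [])

-- ===== PORT B =====
def old_macdonald_alt (name : String) : String :=
  let cs := name.toList
  let chars := cs.map PySem.Chars.lowerChar
  let chars := if 1 ≤ cs.length then
      PySem.List.pySetD chars 0 (PySem.Chars.upperChar (PySem.List.pyGetD cs 0 'a'))
    else chars
  let chars := if 4 ≤ cs.length then
      PySem.List.pySetD chars 3 (PySem.Chars.upperChar (PySem.List.pyGetD cs 3 'a'))
    else chars
  String.ofList chars

-- ===== PRECONDITION & SPEC =====
def Spec_old_macdonald (name : String) (out : String) : Prop := out = old_macdonald_alt name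
instance (name : String) (out : String) : Decidable (Spec_old_macdonald name out) := by unfold Spec_old_macdonald; infer_instance

-- ===== CLAIM (what is proved, stated in full; the proofs are below) =====
def Claim_equal_old_macdonald : Prop := ∀ (name : String), Dom_old_macdonald name → Spec_old_macdonald name (old_macdonald name)

-- ===== LEMMAS AND PROOFS =====

-- the per-position function A's loop applies
def pvStep (a : List Char) (p : Int × Char) : List Char :=
  if p.1 = 0 then a ++ [PySem.Chars.upperChar p.2]
  else if p.1 = 3 then a ++ [PySem.Chars.upperChar p.2]
  else a ++ [PySem.Chars.lowerChar p.2]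

lemma pvFold_eq (xs : List (Int × Char)) (a : List Char) :
    xs.foldl pvStep a = a ++ xs.foldl pvStep [] := by
  induction xs generalizing a with
  | nil => simp
  | cons x xs ih =>
    simp only [List.foldl_cons]
    rw [ih, ih (pvStep [] x)]
    simp [pvStep]
    split_ifs <;> simp

-- past index 3 every step appends the lowercased character
lemma pvTail_lower (xs : List Char) (s : Int) (hs : 4 ≤ s) :
    (PySem.List.enumerate xs s).foldl pvStep [] = xs.map PySem.Chars.lowerChar := by
  induction xs generalizing s with
  | nil => simp [PySem.List.enumerate_nil]
  | cons c cs ih =>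
    rw [PySem.List.enumerate_cons, List.foldl_cons, pvFold_eq, ih (s+1) (by omega)]
    have h0 : ¬ s = 0 := by omega
    have h3 : ¬ s = 3 := by omega
    simp [pvStep, h0, h3]

-- ===== VERDICT (by name: the statement is the Claim_ definition above) =====
theorem old_macdonald_spec : Claim_equal_old_macdonald := by
  intro name _
  show _ = _
  unfold old_macdonald old_macdonald_alt
  show String.ofList ((PySem.List.enumerate name.toList 0).foldl pvStep []) = _
  match h : name.toList with
  | [] => simp [PySem.List.enumerate_nil]
  | [c] =>
    simp [PySem.List.enumerate_cons, PySem.List.enumerate_nil, pvStep,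
      PySem.List.pySetD, PySem.List.pySet?, PySem.List.pyGetD, PySem.List.pyGet?, PySem.List.pyIdx?]
  | [c, d] =>
    simp [PySem.List.enumerate_cons, PySem.List.enumerate_nil, pvStep,
      PySem.List.pySetD, PySem.List.pySet?, PySem.List.pyGetD, PySem.List.pyGet?, PySem.List.pyIdx?]
  | [c, d, e] =>
    simp [PySem.List.enumerate_cons, PySem.List.enumerate_nil, pvStep,
      PySem.List.pySetD, PySem.List.pySet?, PySem.List.pyGetD, PySem.List.pyGet?, PySem.List.pyIdx?]
  | c :: d :: e :: f :: rest =>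
    simp only [PySem.List.enumerate_cons, List.foldl_cons]
    rw [pvFold_eq, pvTail_lower rest (0+1+1+1+1) (by omega)]
    have hA : (0:Int) ≤ (rest.length:Int) + 1 + 1 + 1 := by omega
    have hB : (3:Int) ≤ (rest.length:Int) + 1 + 1 + 1 := by omega
    simp [pvStep, PySem.List.pySetD, PySem.List.pySet?, PySem.List.pyGetD,
      PySem.List.pyGet?, PySem.List.pyIdx?, hA, hB, List.set]
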